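-- pv_equiv track=rewrite | github.com/chimezie/django-snomed-ct | src/snomed_ct/cnl_clauses.py | pattern_and_num_objects
-- ===== SOURCE A (Python) =====
-- def pattern_and_num_objects(phrase):
--     phrase = phrase.replace(" ", "\\s")
--     template_num = phrase.count('{}')
--     if template_num > 1:
--         for idx in range(template_num):
--             phrase = phrase.replace("{}",
--                                     r"(?P<obj{}>[^.,]+)".format(idx+1)
--                                     if idx + 1 == template_num
--                                     else r"(?P<obj{}>[^.,]+)(\.|,)?".format(idx+1), 1)
--         return phrase, template_num
--     else:
--         phrase = phrase.replace("{}", r"(?P<obj>[^.,]+)(\.|,)?")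
--         return phrase, 1
-- ===== SOURCE B (Python) =====
-- def pattern_and_num_objects(phrase):
--     parts = phrase.replace(" ", "\\s").split("{}")
--     num = len(parts) - 1
--     if num <= 1:
--         return r"(?P<obj>[^.,]+)(\.|,)?".join(parts), 1
--     pieces = []
--     for i, part in enumerate(parts):
--         if i > 0:
--             group = "(?P<obj{}>[^.,]+)".format(i)
--             if i < num:
--                 group += r"(\.|,)?"
--             pieces.append(group)
--         pieces.append(part)
--     return "".join(pieces), num
-- ===== Notes on version B (the rewrite author's own statement) =====
-- stated objective: simpler
-- what changed: B splits the space-substituted phrase once at the placeholder markers and assembles the result in a single interleaving pass (a join in the 0/1-placeholder case), instead of A's loop that re-scans the whole string with one single-occurrence replace per placeholder.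
import Mathlib
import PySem

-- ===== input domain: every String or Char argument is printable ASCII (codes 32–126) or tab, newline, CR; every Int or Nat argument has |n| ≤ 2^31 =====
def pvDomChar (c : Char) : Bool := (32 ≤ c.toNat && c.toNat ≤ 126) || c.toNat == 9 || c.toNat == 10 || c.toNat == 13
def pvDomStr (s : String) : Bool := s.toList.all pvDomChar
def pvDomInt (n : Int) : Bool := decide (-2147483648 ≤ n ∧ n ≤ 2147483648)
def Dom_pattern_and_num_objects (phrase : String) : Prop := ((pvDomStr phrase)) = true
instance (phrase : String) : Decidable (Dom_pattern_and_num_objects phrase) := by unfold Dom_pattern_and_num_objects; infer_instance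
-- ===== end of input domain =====

-- B replaces A's repeated single-occurrence re-scanning replaces by one split on the placeholder marker and a single
-- interleaving pass over the parts (objective: simpler); return values proved identical on all inputs.

-- ===== PORT A =====
-- hand port of Python's s.replace(old, new, 1) (replace at most one, leftmost, occurrence);
-- exact: scans left to right, replaces the first position where old is a prefix ('' inserts new in front)
def replaceOnceCs (s old new : List Char) : List Char :=
  match s with
  | [] => if old.isEmpty then new else []
  | c :: t =>
    if old.isPrefixOf (c :: t) then new ++ (c :: t).drop old.length
    else c :: replaceOnceCs t old new

def pattern_and_num_objects (phrase : String) : String × Int :=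
  let ph := PySem.Str.replace phrase " " "\\s"
  let template_num : Int := (PySem.Str.count ph "{}" : Int)
  if 1 < template_num then
    let cs := (PySem.List.pyRange 0 template_num 1).foldl
      (fun s idx =>
        replaceOnceCs s ['{', '}']
          (if idx + 1 = template_num
           then ("(?P<obj" ++ PySem.Int.toStr (idx + 1) ++ ">[^.,]+)").toList
           else ("(?P<obj" ++ PySem.Int.toStr (idx + 1) ++ ">[^.,]+)(\\.|,)?").toList))
      ph.toList
    (String.ofList cs, template_num)
  else
    (PySem.Str.replace ph "{}" "(?P<obj>[^.,]+)(\\.|,)?", 1)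

-- ===== PORT B =====
def pattern_and_num_objects_alt (phrase : String) : String × Int :=
  let parts := PySem.Chars.splitOn (PySem.Str.replace phrase " " "\\s").toList ("{}".toList)
  let num : Int := (parts.length : Int) - 1
  if num ≤ 1 then
    (String.ofList (PySem.Chars.join ("(?P<obj>[^.,]+)(\\.|,)?".toList) parts), 1)
  else
    let pieces := (PySem.List.enumerate parts).foldl
      (fun pieces pr =>
        if 0 < pr.1 then
          let group := ("(?P<obj" ++ PySem.Int.toStr pr.1 ++ ">[^.,]+)").toList
          let group := if pr.1 < num then group ++ "(\\.|,)?".toList else group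
          pieces ++ [group, pr.2]
        else pieces ++ [pr.2]) []
    (String.ofList (PySem.Chars.join [] pieces), num)

-- ===== PRECONDITION & SPEC =====
def Spec_pattern_and_num_objects (phrase : String) (out : String × Int) : Prop := out = pattern_and_num_objects_alt phrase
instance (phrase : String) (out : String × Int) : Decidable (Spec_pattern_and_num_objects phrase out) := by unfold Spec_pattern_and_num_objects; infer_instance

-- ===== CLAIM (what is proved, stated in full; the proofs are below) =====
def Claim_equal_pattern_and_num_objects : Prop := ∀ (phrase : String), Dom_pattern_and_num_objects phrase → Spec_pattern_and_num_objects phrase (pattern_and_num_objects phrase)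

-- ===== LEMMAS AND PROOFS =====

-- the separator '{}'
def sepBr : List Char := ['{', '}']

-- structural version of splitting on '{}'
def splitBr : List Char → List (List Char)
  | [] => [[]]
  | c :: t =>
    if sepBr.isPrefixOf (c :: t) then [] :: splitBr (t.drop 1)
    else (c :: (splitBr t).headI) :: (splitBr t).tail
termination_by s => s.length
decreasing_by all_goals simp

theorem splitBr_ne_nil (s : List Char) : splitBr s ≠ [] := by
  induction s using splitBr.induct with
  | case1 => simp [splitBr]
  | case2 c t h ih => simp [splitBr, h]
  | case3 c t h ih => simp [splitBr, h]

-- the first part of the split is a prefix of the string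
theorem splitBr_headI_prefix (s : List Char) : (splitBr s).headI <+: s := by
  induction s using splitBr.induct with
  | case1 => simp [splitBr]
  | case2 c t h ih => simp [splitBr, h]
  | case3 c t h ih =>
    simp only [splitBr, if_neg h, List.headI]
    exact (List.prefix_cons_inj c).mpr ih

theorem modifyHead_fun_id {α : Type} (l : List (List α)) :
    List.modifyHead (fun x => x) l = l := by cases l <;> simp

theorem intercalate_cc {α : Type} (sep x y : List α) (ys : List (List α)) :
    sep.intercalate (x :: y :: ys) = x ++ sep ++ sep.intercalate (y :: ys) := by
  simp [List.intercalate, List.intersperse]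

theorem intercalate_single {α : Type} (sep x : List α) : sep.intercalate [x] = x := by
  simp [List.intercalate]

theorem splitOn_go_eq (fuel : Nat) (s cur : List Char) (acc : List (List Char))
    (h : s.length ≤ fuel) :
    PySem.Chars.splitOn.go sepBr fuel s cur acc
      = acc.reverse ++ List.modifyHead (cur.reverse ++ ·) (splitBr s) := by
  induction fuel generalizing s cur acc with
  | zero =>
    have : s = [] := by cases s <;> simp_all
    subst this
    rw [PySem.Chars.splitOn.go]
    simp [splitBr]
  | succ fuel ih =>
    cases s with
    | nil => rw [PySem.Chars.splitOn.go]; simp [splitBr]; omega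
    | cons c t =>
      rw [PySem.Chars.splitOn.go]
      by_cases hp : sepBr.isPrefixOf (c :: t)
      · rw [if_pos hp]
        have hd : List.drop sepBr.length (c :: t) = t.drop 1 := by simp [sepBr]
        rw [hd, ih _ _ _ (by simp at h ⊢; omega)]
        simp [splitBr, hp, modifyHead_fun_id]
      · rw [if_neg hp, ih _ _ _ (by simp at h ⊢; omega)]
        simp only [splitBr, if_neg hp]
        obtain ⟨x, xs, hx⟩ : ∃ x xs, splitBr t = x :: xs := by
          cases hsp : splitBr t with
          | nil => exact absurd hsp (splitBr_ne_nil t)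
          | cons x xs => exact ⟨x, xs, rfl⟩
        simp [hx]

theorem splitOn_eq (s : List Char) : PySem.Chars.splitOn s sepBr = splitBr s := by
  rw [PySem.Chars.splitOn, splitOn_go_eq _ _ _ _ (by omega)]
  obtain ⟨x, xs, hx⟩ : ∃ x xs, splitBr s = x :: xs := by
    cases hsp : splitBr s with
    | nil => exact absurd hsp (splitBr_ne_nil s)
    | cons x xs => exact ⟨x, xs, rfl⟩
  simp [hx]

theorem count_go_eq (fuel : Nat) (s : List Char) (acc : Nat) (h : s.length ≤ fuel) :
    PySem.Chars.count.go sepBr fuel s acc = acc + ((splitBr s).length - 1) := by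
  induction fuel generalizing s acc with
  | zero =>
    have : s = [] := by cases s <;> simp_all
    subst this
    rw [PySem.Chars.count.go]
    simp [splitBr]
  | succ fuel ih =>
    cases s with
    | nil => rw [PySem.Chars.count.go]; simp [splitBr]; omega
    | cons c t =>
      rw [PySem.Chars.count.go]
      by_cases hp : sepBr.isPrefixOf (c :: t)
      · rw [if_pos hp]
        have hd : List.drop sepBr.length (c :: t) = t.drop 1 := by simp [sepBr]
        rw [hd, ih _ _ (by simp at h ⊢; omega)]
        have h1 : 1 ≤ (splitBr (t.drop 1)).length :=
          List.length_pos_of_ne_nil (splitBr_ne_nil _)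
        simp only [splitBr, if_pos hp, List.length_cons]
        omega
      · rw [if_neg hp, ih _ _ (by simp at h ⊢; omega)]
        simp only [splitBr, if_neg hp, List.length_cons]
        have h1 : 1 ≤ (splitBr t).length :=
          List.length_pos_of_ne_nil (splitBr_ne_nil _)
        have : (splitBr t).tail.length = (splitBr t).length - 1 := by simp
        omega

theorem count_eq_splitBr (s : List Char) :
    PySem.Chars.count s sepBr = (splitBr s).length - 1 := by
  rw [PySem.Chars.count]
  rw [if_neg (by simp [sepBr])]
  rw [count_go_eq _ _ _ (by omega)]
  omega

theorem replace_go_eq (new : List Char) (fuel : Nat) (s acc : List Char) (h : s.length ≤ fuel) :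
    PySem.Chars.replace.go sepBr new fuel s acc
      = acc.reverse ++ List.intercalate new (splitBr s) := by
  induction fuel generalizing s acc with
  | zero =>
    have : s = [] := by cases s <;> simp_all
    subst this
    rw [PySem.Chars.replace.go]
    simp [splitBr, List.intercalate]
  | succ fuel ih =>
    cases s with
    | nil => rw [PySem.Chars.replace.go]; simp [splitBr, List.intercalate]; omega
    | cons c t =>
      rw [PySem.Chars.replace.go]
      by_cases hp : sepBr.isPrefixOf (c :: t)
      · rw [if_pos hp]
        have hd : List.drop sepBr.length (c :: t) = t.drop 1 := by simp [sepBr]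
        rw [hd, ih _ _ (by simp at h ⊢; omega)]
        obtain ⟨x, xs, hx⟩ : ∃ x xs, splitBr (t.drop 1) = x :: xs := by
          cases hsp : splitBr (t.drop 1) with
          | nil => exact absurd hsp (splitBr_ne_nil _)
          | cons x xs => exact ⟨x, xs, rfl⟩
        simp only [splitBr, if_pos hp, hx, intercalate_cc]
        simp
      · rw [if_neg hp, ih _ _ (by simp at h ⊢; omega)]
        simp only [splitBr, if_neg hp]
        obtain ⟨x, xs, hx⟩ : ∃ x xs, splitBr t = x :: xs := by
          cases hsp : splitBr t with
          | nil => exact absurd hsp (splitBr_ne_nil t)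
          | cons x xs => exact ⟨x, xs, rfl⟩
        cases xs with
        | nil => simp [hx, List.intercalate]
        | cons y ys => simp [hx, intercalate_cc]

theorem replaceBr_eq (s new : List Char) :
    PySem.Chars.replace s sepBr new = List.intercalate new (splitBr s) := by
  rw [PySem.Chars.replace]
  rw [if_neg (by simp [sepBr])]
  rw [replace_go_eq _ _ _ _ (by omega)]
  simp

theorem intercalate_splitBr (s : List Char) : List.intercalate sepBr (splitBr s) = s := by
  induction s using splitBr.induct with
  | case1 => simp [splitBr, List.intercalate]
  | case2 c t h ih =>
    obtain ⟨x, xs, hx⟩ : ∃ x xs, splitBr (t.drop 1) = x :: xs := by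
      cases hsp : splitBr (t.drop 1) with
      | nil => exact absurd hsp (splitBr_ne_nil _)
      | cons x xs => exact ⟨x, xs, rfl⟩
    rw [splitBr, if_pos h]
    rw [hx] at ih ⊢
    rw [intercalate_cc, ih]
    have : c = '{' ∧ t.headI = '}' ∧ t ≠ [] := by
      cases t with
      | nil => simp [sepBr, List.isPrefixOf] at h
      | cons d t' => simp [sepBr, List.isPrefixOf] at h; simp [← h.1, ← h.2]
    obtain ⟨hc, hh, hne⟩ := this
    subst hc
    cases t with
    | nil => simp at hne
    | cons d t' => simp at hh; subst hh; simp [sepBr]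
  | case3 c t h ih =>
    obtain ⟨x, xs, hx⟩ : ∃ x xs, splitBr t = x :: xs := by
      cases hsp : splitBr t with
      | nil => exact absurd hsp (splitBr_ne_nil t)
      | cons x xs => exact ⟨x, xs, rfl⟩
    rw [splitBr, if_neg h]
    rw [hx] at ih ⊢
    cases xs with
    | nil => simp [List.intercalate] at ih ⊢; simp [ih]
    | cons y ys =>
      simp only [List.headI, List.tail]
      rw [intercalate_cc] at ih ⊢
      simp [ih]

-- a Boolean 'contains the substring "{}"' scanner
def hasOcc : List Char → Bool
  | c :: d :: t => (c == '{' && d == '}') || hasOcc (d :: t)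
  | _ => false

theorem hasOcc_append (p q : List Char) :
    hasOcc (p ++ q)
      = (hasOcc p || hasOcc q || (p.getLast? == some '{' && q.head? == some '}')) := by
  induction p with
  | nil => simp [hasOcc]
  | cons c p ih =>
    cases p with
    | nil =>
      cases q with
      | nil => simp [hasOcc]
      | cons e q' =>
        simp only [List.singleton_append, hasOcc, List.getLast?_singleton, List.head?_cons]
        cases hc : (c == '{') <;> cases he : (e == '}') <;> simp_all [hasOcc]
    | cons d p' =>
      simp only [List.cons_append] at ih ⊢
      rw [show hasOcc (c :: d :: (p' ++ q)) = ((c == '{' && d == '}') || hasOcc (d :: (p' ++ q))) from rfl]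
      rw [ih]
      rw [show hasOcc (c :: d :: p') = ((c == '{' && d == '}') || hasOcc (d :: p')) from rfl]
      have : (c :: d :: p').getLast? = (d :: p').getLast? := by simp
      rw [this]
      cases (c == '{' && d == '}') <;> simp

theorem hasOcc_of_no_brace (p : List Char) (h : '{' ∉ p) : hasOcc p = false := by
  induction p with
  | nil => rfl
  | cons c p ih =>
    cases p with
    | nil => rfl
    | cons d p' =>
      rw [show hasOcc (c :: d :: p') = ((c == '{' && d == '}') || hasOcc (d :: p')) from rfl]
      simp only [List.mem_cons, not_or] at h
      rw [ih (by simp; tauto)]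
      have : (c == '{') = false := by simp; exact fun hh => h.1 hh.symm
      simp [this]

theorem splitBr_parts_occ (s : List Char) : ∀ p ∈ splitBr s, hasOcc p = false := by
  induction s using splitBr.induct with
  | case1 => simp [splitBr, hasOcc]
  | case2 c t h ih =>
    rw [splitBr, if_pos h]
    intro p hp
    rcases List.mem_cons.mp hp with hp | hp
    · simp [hp, hasOcc]
    · exact ih p hp
  | case3 c t h ih =>
    rw [splitBr, if_neg h]
    intro p hp
    obtain ⟨x, xs, hx⟩ : ∃ x xs, splitBr t = x :: xs := by
      cases hsp : splitBr t with
      | nil => exact absurd hsp (splitBr_ne_nil t)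
      | cons x xs => exact ⟨x, xs, rfl⟩
    rw [hx] at hp
    simp only [List.headI, List.tail] at hp
    rcases List.mem_cons.mp hp with hp | hp
    · subst hp
      have hxocc : hasOcc x = false := ih x (by rw [hx]; exact List.mem_cons_self ..)
      have hxpre : x <+: t := by
        have := splitBr_headI_prefix t
        rwa [hx] at this
      cases x with
      | nil => rfl
      | cons d x' =>
        rw [show hasOcc (c :: d :: x') = ((c == '{' && d == '}') || hasOcc (d :: x')) from rfl]
        rw [hxocc]
        have : ¬ (c = '{' ∧ d = '}') := by
          intro ⟨hc, hd⟩
          subst hc; subst hd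
          obtain ⟨r, hr⟩ := hxpre
          apply h
          rw [← hr]
          simp [sepBr, List.isPrefixOf]
        cases hc : (c == '{') <;> cases hd : (d == '}') <;> simp_all
    · exact ih p (by rw [hx]; exact List.mem_cons_of_mem _ hp)
  

theorem replaceOnce_spec (p t new : List Char) (h : hasOcc p = false) :
    replaceOnceCs (p ++ '{' :: '}' :: t) sepBr new = p ++ new ++ t := by
  induction p with
  | nil =>
    simp only [List.nil_append]
    rw [replaceOnceCs]
    rw [if_pos (by simp [sepBr, List.isPrefixOf])]
    simp [sepBr]
  | cons c p ih =>
    have hnp : ¬ sepBr.isPrefixOf (c :: (p ++ '{' :: '}' :: t)) = true := by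
      cases p with
      | nil =>
        simp only [List.nil_append, sepBr, List.isPrefixOf, Bool.and_eq_true, beq_iff_eq]
        intro hco
        exact absurd hco.2 (by decide)
      | cons d p' =>
        rw [show hasOcc (c :: d :: p') = ((c == '{' && d == '}') || hasOcc (d :: p')) from rfl] at h
        simp only [Bool.or_eq_false_iff, Bool.and_eq_false_iff] at h
        simp [sepBr, List.isPrefixOf]
        intro hc hd
        rcases h.1 with h' | h' <;> simp [← hc, ← hd] at h'
    rw [List.cons_append, replaceOnceCs, if_neg hnp]
    have hp : hasOcc p = false := by
      cases p with
      | nil => rfl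
      | cons d p' =>
        rw [show hasOcc (c :: d :: p') = ((c == '{' && d == '}') || hasOcc (d :: p')) from rfl] at h
        simp only [Bool.or_eq_false_iff] at h
        exact h.2
    rw [ih hp]
    simp

theorem digitChar_ne_brace (m : Nat) : Nat.digitChar m ≠ '{' := by
  rw [Nat.digitChar]
  by_cases h0 : m = 0
  · rw [if_pos h0]
    decide
  rw [if_neg h0]
  by_cases h1 : m = 1
  · rw [if_pos h1]
    decide
  rw [if_neg h1]
  by_cases h2 : m = 2
  · rw [if_pos h2]
    decide
  rw [if_neg h2]
  by_cases h3 : m = 3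
  · rw [if_pos h3]
    decide
  rw [if_neg h3]
  by_cases h4 : m = 4
  · rw [if_pos h4]
    decide
  rw [if_neg h4]
  by_cases h5 : m = 5
  · rw [if_pos h5]
    decide
  rw [if_neg h5]
  by_cases h6 : m = 6
  · rw [if_pos h6]
    decide
  rw [if_neg h6]
  by_cases h7 : m = 7
  · rw [if_pos h7]
    decide
  rw [if_neg h7]
  by_cases h8 : m = 8
  · rw [if_pos h8]
    decide
  rw [if_neg h8]
  by_cases h9 : m = 9
  · rw [if_pos h9]
    decide
  rw [if_neg h9]
  by_cases h10 : m = 10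
  · rw [if_pos h10]
    decide
  rw [if_neg h10]
  by_cases h11 : m = 11
  · rw [if_pos h11]
    decide
  rw [if_neg h11]
  by_cases h12 : m = 12
  · rw [if_pos h12]
    decide
  rw [if_neg h12]
  by_cases h13 : m = 13
  · rw [if_pos h13]
    decide
  rw [if_neg h13]
  by_cases h14 : m = 14
  · rw [if_pos h14]
    decide
  rw [if_neg h14]
  by_cases h15 : m = 15
  · rw [if_pos h15]
    decide
  rw [if_neg h15]
  decide

theorem toDigitsCore_no_brace (fuel n : Nat) (acc : List Char) (h : '{' ∉ acc) :
    '{' ∉ Nat.toDigitsCore 10 fuel n acc := by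
  induction fuel generalizing n acc with
  | zero => rw [Nat.toDigitsCore]; exact h
  | succ fuel ih =>
    rw [Nat.toDigitsCore]
    split
    · intro hm
      rcases List.mem_cons.mp hm with hm | hm
      · exact digitChar_ne_brace _ hm.symm
      · exact h hm
    · exact ih _ _ (by
        intro hm
        rcases List.mem_cons.mp hm with hm | hm
        · exact digitChar_ne_brace _ hm.symm
        · exact h hm)

theorem toChars_no_brace (n : Int) : '{' ∉ PySem.Int.toChars n := by
  rw [PySem.Int.toChars]
  split
  · intro hm
    rcases List.mem_cons.mp hm with hm | hm
    · exact absurd hm.symm (by decide)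
    · exact toDigitsCore_no_brace _ _ _ (by simp) hm
  · exact toDigitsCore_no_brace _ _ _ (by simp)

-- the group texts of the proofs
def grp (i : Int) : List Char :=
  "(?P<obj".toList ++ (PySem.Int.toStr i).toList ++ ">[^.,]+)".toList
def sfx : List Char := "(\\.|,)?".toList

theorem toStr_toList (i : Int) : (PySem.Int.toStr i).toList = PySem.Int.toChars i := by
  rw [PySem.Int.toStr]; simp

theorem grp_hasOcc (i : Int) : hasOcc (grp i) = false := by
  rw [grp, toStr_toList]
  rw [hasOcc_append, hasOcc_append]
  rw [hasOcc_of_no_brace _ (by decide)]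
  rw [hasOcc_of_no_brace _ (toChars_no_brace i)]
  rw [hasOcc_of_no_brace (">[^.,]+)".toList) (by decide)]
  have h1 : (("(?P<obj".toList : List Char).getLast? == some '{') = false := by decide
  have h2 : ((">[^.,]+)".toList : List Char).head? == some '}') = false := by decide
  simp only [h1, h2, Bool.or_false, Bool.and_false, Bool.false_and]

theorem grp_head (i : Int) : (grp i).head? = some '(' := by
  rw [grp]; rfl

theorem grp_last (i : Int) : (grp i).getLast? = some ')' := by
  rw [grp, List.getLast?_append]
  have h : (">[^.,]+)".toList : List Char).getLast? = some ')' := by decide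
  rw [h]; rfl

-- the interleaving both programs produce in the multi-placeholder case
def buildRest : List (List Char) → Int → Int → List Char
  | [], _, _ => []
  | [p], _, _ => p
  | p :: ps, j, n =>
    p ++ (grp (j + 1) ++ if j + 1 = n then [] else sfx) ++ buildRest ps (j + 1) n

theorem portGrp_eq (i : Int) :
    ("(?P<obj" ++ PySem.Int.toStr i ++ ">[^.,]+)").toList = grp i := by
  simp [grp]

theorem portGrpSfx_eq (i : Int) :
    ("(?P<obj" ++ PySem.Int.toStr i ++ ">[^.,]+)(\\.|,)?").toList = grp i ++ sfx := by
  have h : (">[^.,]+)(\\.|,)?".toList : List Char) = ">[^.,]+)".toList ++ "(\\.|,)?".toList := by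
    decide
  simp [grp, sfx, h]

theorem hasOcc_sfx : hasOcc sfx = false := by decide

theorem loopA (parts : List (List Char)) (acc : List Char) (j n : Int)
    (hne : parts ≠ []) (hocc : ∀ p ∈ parts, hasOcc p = false)
    (hacc : hasOcc acc = false) (hlast : acc.getLast? ≠ some '{')
    (hlen : j + (parts.length : Int) - 1 = n) :
    (PySem.List.pyRange j n 1).foldl
      (fun s idx =>
        replaceOnceCs s ['{', '}']
          (if idx + 1 = n
           then ("(?P<obj" ++ PySem.Int.toStr (idx + 1) ++ ">[^.,]+)").toList
           else ("(?P<obj" ++ PySem.Int.toStr (idx + 1) ++ ">[^.,]+)(\\.|,)?").toList))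
      (acc ++ List.intercalate sepBr parts)
      = acc ++ buildRest parts j n := by
  induction parts generalizing acc j with
  | nil => exact absurd rfl hne
  | cons p rest ih =>
    cases rest with
    | nil =>
      have hj : j = n := by simp at hlen; omega
      subst hj
      rw [PySem.List.pyRange_one_eq_nil (le_refl j)]
      simp [buildRest, intercalate_single]
    | cons q qs =>
      have hjn : j < n := by simp at hlen; omega
      rw [PySem.List.pyRange_one_cons hjn]
      rw [List.foldl_cons]
      -- the replacement text used at index j
      set g : List Char := if j + 1 = n then grp (j + 1) else grp (j + 1) ++ sfx with hg
      have hgtext :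
          (if j + 1 = n
           then ("(?P<obj" ++ PySem.Int.toStr (j + 1) ++ ">[^.,]+)").toList
           else ("(?P<obj" ++ PySem.Int.toStr (j + 1) ++ ">[^.,]+)(\\.|,)?").toList) = g := by
        by_cases hc : j + 1 = n
        · rw [if_pos hc, hg, if_pos hc]; exact portGrp_eq _
        · rw [if_neg hc, hg, if_neg hc]; exact portGrpSfx_eq _
      have hoccp : hasOcc p = false := hocc p (by simp)
      have haccp : hasOcc (acc ++ p) = false := by
        rw [hasOcc_append, hacc, hoccp]
        have : (acc.getLast? == some '{') = false := by
          cases hq : acc.getLast? == some '{' with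
          | false => rfl
          | true => exact absurd (by simpa using hq) hlast
        simp [this]
      have hstep :
          replaceOnceCs (acc ++ List.intercalate sepBr (p :: q :: qs)) ['{', '}']
            (if j + 1 = n
             then ("(?P<obj" ++ PySem.Int.toStr (j + 1) ++ ">[^.,]+)").toList
             else ("(?P<obj" ++ PySem.Int.toStr (j + 1) ++ ">[^.,]+)(\\.|,)?").toList)
            = (acc ++ p ++ g) ++ List.intercalate sepBr (q :: qs) := by
        rw [hgtext, intercalate_cc]
        have harr : acc ++ (p ++ sepBr ++ List.intercalate sepBr (q :: qs))
            = (acc ++ p) ++ ('{' :: '}' :: List.intercalate sepBr (q :: qs)) := by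
          simp [sepBr]
        rw [harr]
        rw [show (['{', '}'] : List Char) = sepBr from rfl]
        rw [replaceOnce_spec _ _ _ haccp]
      rw [hstep]
      -- properties of the new accumulator
      have hgne : g ≠ [] := by
        rw [hg]; split
        · rw [grp]; simp
        · rw [grp]; simp
      have hghead : g.head? = some '(' := by
        rw [hg]; split
        · exact grp_head _
        · rw [List.head?_append_of_ne_nil _ (by rw [grp]; simp)]
          exact grp_head _
      have hglast : g.getLast? ≠ some '{' := by
        rw [hg]; split
        · rw [grp_last]; decide
        · rw [List.getLast?_append]
          have hs : (sfx.getLast? : Option Char) = some '?' := by decide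
          rw [hs, Option.some_or]
          decide
      have hgocc : hasOcc g = false := by
        rw [hg]; split
        · exact grp_hasOcc _
        · rw [hasOcc_append, grp_hasOcc, hasOcc_sfx, grp_last]
          decide
      have haccg : hasOcc (acc ++ p ++ g) = false := by
        rw [hasOcc_append, haccp, hgocc, hghead]
        simp
      have hlastg : (acc ++ p ++ g).getLast? ≠ some '{' := by
        rw [List.getLast?_append]
        cases hge : g.getLast? with
        | none => exact absurd (List.getLast?_eq_none_iff.mp hge) hgne
        | some c =>
          rw [hge] at hglast
          rw [Option.some_or]
          exact hglast
      have := ih (acc ++ p ++ g) (j + 1) (by simp) (fun r hr => hocc r (by simp [hr]))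
        haccg hlastg (by simp at hlen ⊢; omega)
      rw [this]
      have hgite : g = grp (j + 1) ++ if j + 1 = n then [] else sfx := by
        rw [hg]; split <;> simp
      have hb : buildRest (p :: q :: qs) j n
          = p ++ (grp (j + 1) ++ if j + 1 = n then [] else sfx) ++ buildRest (q :: qs) (j + 1) n := by
        rw [buildRest]
        exact fun h => absurd h (List.cons_ne_nil _ _)
      rw [hb, hgite]
      simp

-- B's interleaving chunks, and their flattening
def chunk (num : Int) : List (List Char) → Int → List (List Char)
  | [], _ => []
  | p :: ps, i => (if i < num then grp i ++ sfx else grp i) :: p :: chunk num ps (i + 1)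

theorem foldB (num : Int) (ps : List (List Char)) (i0 : Int) (pcs : List (List Char))
    (h1 : 1 ≤ i0) :
    (PySem.List.enumerate ps i0).foldl
      (fun pieces pr =>
        if 0 < pr.1 then
          let group := ("(?P<obj" ++ PySem.Int.toStr pr.1 ++ ">[^.,]+)").toList
          let group := if pr.1 < num then group ++ "(\\.|,)?".toList else group
          pieces ++ [group, pr.2]
        else pieces ++ [pr.2]) pcs
      = pcs ++ chunk num ps i0 := by
  induction ps generalizing i0 pcs with
  | nil => rw [PySem.List.enumerate]; simp [chunk]
  | cons p ps ih =>
    rw [PySem.List.enumerate, List.foldl_cons]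
    rw [ih (i0 + 1) _ (by omega)]
    rw [chunk]
    have hpos : (0 : Int) < i0 := by omega
    rw [if_pos hpos]
    simp only [portGrp_eq]
    rw [show ("(\\.|,)?".toList : List Char) = sfx from rfl]
    by_cases hc : i0 < num
    · rw [if_pos hc]; simp
    · rw [if_neg hc]; simp

theorem intercalate_nil_flatten {α : Type} (l : List (List α)) :
    List.intercalate ([] : List α) l = l.flatten := by
  induction l with
  | nil => simp [List.intercalate]
  | cons x xs ih =>
    cases xs with
    | nil => simp [List.intercalate]
    | cons y ys => rw [intercalate_cc, List.flatten_cons, ih]; simp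

theorem chunk_flatten (ps : List (List Char)) : ∀ (p : List Char) (j n : Int),
    j + ((p :: ps).length : Int) - 1 = n →
    (p :: chunk n ps (j + 1)).flatten = buildRest (p :: ps) j n := by
  induction ps with
  | nil => intro p j n _; simp [chunk, buildRest]
  | cons q qs ih =>
    intro p j n hl
    have hbr : buildRest (p :: q :: qs) j n
        = p ++ (grp (j + 1) ++ if j + 1 = n then [] else sfx) ++ buildRest (q :: qs) (j + 1) n := by
      rw [buildRest]
      exact fun h => absurd h (List.cons_ne_nil _ _)
    rw [chunk, hbr]
    have hq := ih q (j + 1) n (by simp at hl ⊢; omega)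
    rw [show j + 1 + 1 = j + 1 + 1 from rfl] at hq
    simp only [List.flatten_cons] at hq ⊢
    rw [hq]
    have hle : j + 1 ≤ n := by simp at hl; omega
    have hite : (if j + 1 < n then grp (j + 1) ++ sfx else grp (j + 1))
        = grp (j + 1) ++ (if j + 1 = n then [] else sfx) := by
      by_cases hc : j + 1 = n
      · rw [if_pos hc, if_neg (by omega)]; simp
      · rw [if_neg hc, if_pos (by omega)]
    rw [hite]
    simp

-- ===== VERDICT (by name: the statement is the Claim_ definition above) =====
theorem ofList_of_toList_eq (a : String) (b : List Char) (h : a.toList = b) :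
    a = String.ofList b := by rw [← h]; simp

theorem pattern_and_num_objects_spec : Claim_equal_pattern_and_num_objects := by
  intro phrase _
  unfold Spec_pattern_and_num_objects
  simp only [pattern_and_num_objects, pattern_and_num_objects_alt]
  have hsep : ("{}" : String).toList = sepBr := by decide
  set ph := PySem.Str.replace phrase " " "\\s" with hph
  have hcount : PySem.Str.count ph "{}" = (splitBr ph.toList).length - 1 := by
    rw [PySem.Str.count_eq, hsep, count_eq_splitBr]
  have hsplit : PySem.Chars.splitOn ph.toList ("{}".toList) = splitBr ph.toList := by
    rw [hsep, splitOn_eq]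
  rw [hcount, hsplit]
  set L := (splitBr ph.toList).length with hL
  have hL1 : 1 ≤ L := List.length_pos_of_ne_nil (splitBr_ne_nil _)
  by_cases hbig : 3 ≤ L
  · -- both take the multi-placeholder branch
    rw [if_pos (show (1 : Int) < ((L - 1 : Nat) : Int) by omega)]
    rw [if_neg (show ¬ ((L : Int) - 1 ≤ 1) by omega)]
    -- A's loop
    have hA := loopA (splitBr ph.toList) [] 0 ((L - 1 : Nat) : Int)
      (splitBr_ne_nil _) (splitBr_parts_occ _) rfl (by simp)
      (by rw [← hL]; omega)
    rw [List.nil_append, intercalate_splitBr] at hA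
    rw [hA, List.nil_append]
    -- B's fold
    obtain ⟨p, rest, hp⟩ : ∃ p rest, splitBr ph.toList = p :: rest := by
      cases hsp : splitBr ph.toList with
      | nil => exact absurd hsp (splitBr_ne_nil _)
      | cons p rest => exact ⟨p, rest, rfl⟩
    rw [hp]
    rw [PySem.List.enumerate, List.foldl_cons]
    rw [if_neg (by omega)]
    rw [foldB _ _ _ _ (by omega)]
    have hlen : ((L : Int) - 1) = ((L - 1 : Nat) : Int) := by omega
    have hchunk := chunk_flatten rest p 0 ((L - 1 : Nat) : Int)
      (by rw [← hp, ← hL]; omega)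
    rw [hlen]
    refine Prod.ext ?_ rfl
    show String.ofList (buildRest (p :: rest) 0 ((L - 1 : Nat) : Int))
      = String.ofList (PySem.Chars.join [] ([] ++ [(0, p).2] ++ chunk ((L - 1 : Nat) : Int) rest (0 + 1)))
    rw [PySem.Chars.join, intercalate_nil_flatten]
    have hps : ([] ++ [((0 : Int), p).2] ++ chunk ((L - 1 : Nat) : Int) rest (0 + 1))
        = p :: chunk ((L - 1 : Nat) : Int) rest (0 + 1) := by simp
    rw [hps, hchunk]

  · -- both take the single/zero-placeholder branch
    rw [if_neg (show ¬ (1 : Int) < ((L - 1 : Nat) : Int) by omega)]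
    rw [if_pos (show ((L : Int) - 1 ≤ 1) by omega)]
    refine Prod.ext ?_ rfl
    exact ofList_of_toList_eq _ _ (by
      rw [PySem.Str.toList_replace, hsep, replaceBr_eq, PySem.Chars.join])
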